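-- pv_equiv track=rewrite | github.com/jskim7018/leetcode_study | algorithm_study/2025/02/20250201/LC_3400.py | maximumMatchingIndices
-- ===== SOURCE A (Python) =====
-- from typing import List
--
-- def maximumMatchingIndices(nums1: List[int], nums2: List[int]) -> int:
--
--     def get_matching_cnt(nums1, nums2) -> int:
--         cnt = 0
--         for num1, num2 in zip(nums1, nums2):
--             if num1 == num2:
--                 cnt += 1
--
--         return cnt
--
--     ans = 0
--     for i in range(len(nums1)):
--         new_nums1 = nums1[i:len(nums1)] + nums1[0:i]
--         ans = max(ans, get_matching_cnt(new_nums1, nums2))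
--
--     return ans
-- ===== SOURCE B (Python) =====
-- from typing import List
--
-- def maximumMatchingIndices(nums1: List[int], nums2: List[int]) -> int:
--     # Tally, per equal-value pair (p, q), the shift (p - q) % n that aligns them,
--     # grouping nums1's positions by value; the best shift has the max tally.
--     n = len(nums1)
--     if n == 0:
--         return 0
--     pos = {}
--     for p, v in enumerate(nums1):
--         pos.setdefault(v, []).append(p)
--     cnt = [0] * n
--     for q, v in enumerate(nums2[:n]):
--         for p in pos.get(v, []):
--             cnt[(p - q) % n] += 1
--     return max(cnt)
-- ===== Notes on version B (the rewrite author's own statement) =====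
-- stated objective: alternative
-- what changed: Instead of rebuilding every rotation of nums1 and recounting matches per shift, B groups nums1's positions by value in one dict pass and tallies, for each equal-value pair (p,q), the aligning shift (p-q) mod n, returning the max tally.
import Mathlib
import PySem

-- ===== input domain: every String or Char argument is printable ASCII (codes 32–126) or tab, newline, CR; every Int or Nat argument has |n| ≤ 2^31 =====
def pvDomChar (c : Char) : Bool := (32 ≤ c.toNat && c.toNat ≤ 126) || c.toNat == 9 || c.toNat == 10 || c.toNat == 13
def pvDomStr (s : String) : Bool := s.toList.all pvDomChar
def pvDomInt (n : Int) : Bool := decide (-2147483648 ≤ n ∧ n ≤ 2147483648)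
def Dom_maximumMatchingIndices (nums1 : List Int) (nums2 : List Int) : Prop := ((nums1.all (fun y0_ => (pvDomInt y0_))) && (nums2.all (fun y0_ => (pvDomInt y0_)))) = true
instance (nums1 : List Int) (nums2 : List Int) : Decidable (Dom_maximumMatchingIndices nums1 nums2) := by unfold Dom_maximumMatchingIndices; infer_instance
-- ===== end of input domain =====

-- B replaces A's rebuild-every-rotation-and-recount scan by a one-pass tally of the
-- aligning shift (p-q) mod n over equal-value pairs, grouped by value (objective: alternative).

-- ===== PORT A =====
def pvGetMatchingCnt (l1 l2 : List Int) : Int :=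
  (l1.zip l2).foldl (fun cnt pr => if pr.1 == pr.2 then cnt + 1 else cnt) 0

def maximumMatchingIndices (nums1 : List Int) (nums2 : List Int) : Int :=
  (PySem.List.pyRange 0 (nums1.length : Int) 1).foldl
    (fun ans i =>
      max ans (pvGetMatchingCnt
        (PySem.List.slice nums1 (some i) (some (nums1.length : Int)) ++
         PySem.List.slice nums1 (some 0) (some i)) nums2)) 0

-- ===== PORT B =====
-- pos.setdefault(v, []).append(p)  ==  pos[v] = pos.get(v, []) + [p]
def pvBuildPos (nums1 : List Int) : PySem.Dict Int (List Int) :=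
  (PySem.List.enumerate nums1 0).foldl
    (fun d pv => d.modify pv.2 [] (fun l => l ++ [pv.1])) PySem.Dict.empty

-- the inner 'for p in pos.get(v, []): cnt[(p - q) % n] += 1' loop of Source B
def pvTally (pos : PySem.Dict Int (List Int)) (n : Nat) (qv : Int × Int) (cnt : List Int) : List Int :=
  (pos.getD qv.2 []).foldl
    (fun c p =>
      PySem.List.pySetD c (PySem.Int.mod (p - qv.1) (n : Int))
        (PySem.List.pyGetD c (PySem.Int.mod (p - qv.1) (n : Int)) 0 + 1)) cnt

def maximumMatchingIndices_alt (nums1 : List Int) (nums2 : List Int) : Int :=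
  let n := nums1.length
  if n = 0 then 0
  else
    let pos := pvBuildPos nums1
    let cnt := (PySem.List.enumerate (PySem.List.slice nums2 none (some (n : Int))) 0).foldl
      (fun c qv => pvTally pos n qv c) (List.replicate n 0)
    -- max(cnt); cnt is nonempty here (n > 0), so the none branch is dead
    match PySem.List.max? cnt (fun x => x) with
    | some m => m
    | none => 0

-- ===== PRECONDITION & SPEC =====
def Spec_maximumMatchingIndices (nums1 : List Int) (nums2 : List Int) (out : Int) : Prop := out = maximumMatchingIndices_alt nums1 nums2
instance (nums1 : List Int) (nums2 : List Int) (out : Int) : Decidable (Spec_maximumMatchingIndices nums1 nums2 out) := by unfold Spec_maximumMatchingIndices; infer_instance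

-- ===== CLAIM (what is proved, stated in full; the proofs are below) =====
def Claim_equal_maximumMatchingIndices : Prop := ∀ (nums1 : List Int) (nums2 : List Int), Dom_maximumMatchingIndices nums1 nums2 → Spec_maximumMatchingIndices nums1 nums2 (maximumMatchingIndices nums1 nums2)

-- ===== LEMMAS AND PROOFS =====

-- The per-shift match count both programs compute, as a plain countP over positions.
def pvC (nums1 nums2 : List Int) (i : Nat) : Int :=
  ((List.range (min nums1.length nums2.length)).countP
    (fun k => nums1.getD ((i + k) % nums1.length) 0 == nums2.getD k 0) : Int)

theorem pv_zipcount (l1 : List Int) : ∀ (l2 : List Int),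
    (l1.zip l2).countP (fun pr => pr.1 == pr.2)
      = (List.range (min l1.length l2.length)).countP
          (fun k => l1.getD k 0 == l2.getD k 0) := by
  induction l1 with
  | nil => intro l2; simp
  | cons a t ih =>
    intro l2
    cases l2 with
    | nil => simp
    | cons b t2 =>
      simp only [List.zip_cons_cons, List.countP_cons, ih t2, List.length_cons]
      rw [show min (t.length+1) (t2.length+1) = min t.length t2.length + 1 by omega]
      rw [List.range_succ_eq_map]
      simp [List.countP_cons, List.countP_map, Function.comp_def]

theorem pv_rot_getD (l : List Int) (i k : Nat) (hi : i < l.length) (hk : k < l.length) :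
    (l.drop i ++ l.take i).getD k 0 = l.getD ((i + k) % l.length) 0 := by
  by_cases h : k < l.length - i
  · rw [List.getD_eq_getElem?_getD, List.getElem?_append_left (by simp only [List.length_drop]; omega)]
    rw [List.getElem?_drop, Nat.mod_eq_of_lt (by omega : i + k < l.length), List.getD_eq_getElem?_getD]
  · rw [List.getD_eq_getElem?_getD, List.getElem?_append_right (by simp only [List.length_drop]; omega)]
    simp only [List.length_drop]
    rw [List.getElem?_take_of_lt (by omega), Nat.mod_eq_sub_mod (by omega : l.length ≤ i + k),
      Nat.mod_eq_of_lt (by omega), show k - (l.length - i) = i + k - l.length by omega,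
      List.getD_eq_getElem?_getD]

theorem pv_matchcnt (l1 l2 : List Int) :
    pvGetMatchingCnt l1 l2
      = ((List.range (min l1.length l2.length)).countP
          (fun k => l1.getD k 0 == l2.getD k 0) : Int) := by
  unfold pvGetMatchingCnt
  have h := PySem.List.foldl_if_add_one (fun pr : Int × Int => pr.1 == pr.2) (l1.zip l2) 0
  rw [pv_zipcount] at h
  simpa using h

theorem pv_A_eq (nums1 nums2 : List Int) :
    maximumMatchingIndices nums1 nums2
      = (List.range nums1.length).foldl (fun a i => max a (pvC nums1 nums2 i)) 0 := by
  unfold maximumMatchingIndices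
  rw [PySem.List.pyRange_zero_natCast, List.foldl_map]
  apply PySem.List.foldl_congr_mem
  intro acc k hk
  rw [List.mem_range] at hk
  rw [PySem.List.slice_natCast, PySem.List.slice_zero_start, PySem.List.slice_to_natCast]
  rw [List.take_of_length_le (by simp)]
  rw [pv_matchcnt]
  congr 1
  have hlen : (nums1.drop k ++ nums1.take k).length = nums1.length := by simp; omega
  rw [hlen]
  unfold pvC
  have : (List.range (min nums1.length nums2.length)).countP
      (fun j => (nums1.drop k ++ nums1.take k).getD j 0 == nums2.getD j 0)
      = (List.range (min nums1.length nums2.length)).countP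
      (fun j => nums1.getD ((k + j) % nums1.length) 0 == nums2.getD j 0) := by
    apply List.countP_congr
    intro j hj
    rw [List.mem_range] at hj
    rw [pv_rot_getD nums1 k j hk (by omega)]
  exact_mod_cast this

theorem pv_pos_aux (L : List (Int × Int)) : ∀ (d : PySem.Dict Int (List Int)) (v : Int),
    ((L.foldl (fun d pv => d.modify pv.2 [] (fun l => l ++ [pv.1])) d).getD v [])
      = d.getD v [] ++ (L.filter (fun pv => pv.2 == v)).map (·.1) := by
  induction L with
  | nil => intro d v; simp
  | cons x t ih =>
    intro d v
    rw [List.foldl_cons, ih, List.filter_cons]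
    by_cases hv : x.2 = v
    · simp [hv]
    · simp [hv, PySem.Dict.getD_modify, Ne.symm hv]

theorem pv_pos (nums1 : List Int) (v : Int) :
    (pvBuildPos nums1).getD v []
      = (PySem.List.pyRange 0 (nums1.length : Int) 1).filter
          (fun j => PySem.List.pyGetD nums1 j 0 == v) := by
  unfold pvBuildPos
  rw [pv_pos_aux, PySem.List.enumerate_eq_map_pyRange nums1 0, List.filter_map, List.map_map]
  simp [Function.comp_def]

theorem pv_count_range (n t : Nat) (p : Nat → Bool) (ht : t < n) :
    (List.range n).countP (fun k => decide (k = t) && p k) = if p t then 1 else 0 := by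
  induction n with
  | zero => omega
  | succ n ih =>
    rw [List.range_succ, List.countP_append]
    by_cases h : t = n
    · subst h
      rw [List.countP_eq_zero.mpr ?_]
      · simp
      · intro k hk; simp at hk ⊢; intro he; omega
    · rw [ih (by omega)]
      simp [Ne.symm h]

theorem pv_mod_iff (n i q k : Nat) (hn : 0 < n) (hi : i < n) (hk : k < n) :
    (PySem.Int.mod ((k : Int) - (q : Int)) (n : Int) = (i : Int)) ↔ k = (i + q) % n := by
  rw [PySem.Int.mod_eq_emod_of_pos (by exact_mod_cast hn)]
  constructor
  · intro h
    have hm : Int.ModEq n ((k : Int) - q) i := by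
      unfold Int.ModEq; rw [h, Int.emod_eq_of_lt (by omega) (by omega)]
    have hk2 : Int.ModEq n (k : Int) ((i : Int) + q) := by
      have := hm.add_right (q : Int); simpa using this
    have h1 : (k : Int) % n = (k : Int) := Int.emod_eq_of_lt (by omega) (by omega)
    have h2 : ((i : Int) + q) % n = (((i + q) % n : Nat) : Int) := by
      rw [Int.natCast_mod]; push_cast; rfl
    have : (k : Int) = (((i + q) % n : Nat) : Int) := by rw [← h1, hk2, h2]
    exact_mod_cast this
  · intro h
    subst h
    have hm : Int.ModEq n ((((i + q) % n : Nat) : Int)) ((i : Int) + q) := by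
      unfold Int.ModEq
      rw [Int.natCast_mod]; push_cast
      exact Int.emod_emod_of_dvd _ dvd_rfl
    have h3 : Int.ModEq n ((((i + q) % n : Nat) : Int) - q) i := by
      simpa using hm.sub_right (q : Int)
    unfold Int.ModEq at h3
    rw [h3, Int.emod_eq_of_lt (by omega) (by omega)]

theorem pv_enum_cons (x : Int) (xs : List Int) (s : Int) :
    PySem.List.enumerate (x :: xs) s = (s, x) :: PySem.List.enumerate xs (s + 1) := by
  have := PySem.List.enumerate_append [x] xs s
  simp only [List.singleton_append, List.length_cons, List.length_nil] at this
  rw [this]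
  simp [PySem.List.enumerate]

theorem pv_incr (n : Nat) (q : Int) (ps : List Int) (hps : ∀ p ∈ ps, 0 ≤ p ∧ p < (n : Int)) (hn : 0 < n) :
    ∀ (cnt : List Int), cnt.length = n →
    ((ps.foldl (fun c p =>
        PySem.List.pySetD c (PySem.Int.mod (p - q) (n : Int))
          (PySem.List.pyGetD c (PySem.Int.mod (p - q) (n : Int)) 0 + 1)) cnt).length = n
     ∧ ∀ i : Nat, i < n →
        (ps.foldl (fun c p =>
          PySem.List.pySetD c (PySem.Int.mod (p - q) (n : Int))
            (PySem.List.pyGetD c (PySem.Int.mod (p - q) (n : Int)) 0 + 1)) cnt).getD i 0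
          = cnt.getD i 0 + (ps.countP (fun p => PySem.Int.mod (p - q) (n : Int) == (i : Int)) : Int)) := by
  induction ps with
  | nil => intro cnt hc; simpa using hc
  | cons p t ih =>
    intro cnt hc
    have hn' : (0 : Int) < (n : Int) := by exact_mod_cast hn
    have hj0 : 0 ≤ PySem.Int.mod (p - q) (n : Int) := PySem.Int.mod_nonneg _ hn'
    have hjn : PySem.Int.mod (p - q) (n : Int) < n := PySem.Int.mod_lt _ hn'
    set j : Int := PySem.Int.mod (p - q) (n : Int) with hj
    have hjcast : j = ((j.toNat : Nat) : Int) := (Int.toNat_of_nonneg hj0).symm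
    rw [List.foldl_cons, ← hj]
    set c' : List Int := PySem.List.pySetD cnt j (PySem.List.pyGetD cnt j 0 + 1) with hc'
    have hlen' : c'.length = n := by rw [hc', PySem.List.length_pySetD, hc]
    have ihc := ih (fun p hp => hps p (List.mem_cons_of_mem _ hp)) c' hlen'
    refine ⟨ihc.1, ?_⟩
    intro i hilt
    rw [ihc.2 i hilt, List.countP_cons]
    have hset := PySem.List.pyGetD_pySetD_natCast cnt j.toNat i
      (PySem.List.pyGetD cnt ((j.toNat : Nat) : Int) 0 + 1) 0 (by omega)
    have h1 : c'.getD i 0 = PySem.List.pyGetD c' ((i : Nat) : Int) 0 :=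
      (PySem.List.pyGetD_natCast c' i 0).symm
    by_cases hij : i = j.toNat
    · have hbeq : (j == (i : Int)) = true := by rw [beq_iff_eq]; omega
      rw [hbeq]
      have hc'i : c'.getD i 0 = cnt.getD i 0 + 1 := by
        rw [h1, hc', hjcast, hset, if_pos hij, hij, PySem.List.pyGetD_natCast]
      rw [hc'i]
      simp
      omega
    · have hbeq : (j == (i : Int)) = false := by
        rw [beq_eq_false_iff_ne]; intro he; apply hij; omega
      rw [hbeq]
      have hc'i : c'.getD i 0 = cnt.getD i 0 := by
        rw [h1, hc', hjcast, hset, if_neg hij, PySem.List.pyGetD_natCast]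
      rw [hc'i]
      simp

theorem pv_tally (nums1 : List Int) (q : Nat) (v : Int) (cnt : List Int)
    (hn : 0 < nums1.length) (hc : cnt.length = nums1.length) :
    (pvTally (pvBuildPos nums1) nums1.length ((q : Int), v) cnt).length = nums1.length
    ∧ ∀ i : Nat, i < nums1.length →
      (pvTally (pvBuildPos nums1) nums1.length ((q : Int), v) cnt).getD i 0
        = cnt.getD i 0 + (if nums1.getD ((i + q) % nums1.length) 0 == v then 1 else 0) := by
  unfold pvTally
  rw [pv_pos]
  have hps : ∀ p ∈ (PySem.List.pyRange 0 (nums1.length : Int) 1).filter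
      (fun j => PySem.List.pyGetD nums1 j 0 == v), 0 ≤ p ∧ p < (nums1.length : Int) := by
    intro p hp
    exact PySem.List.mem_pyRange_one.mp (List.mem_filter.mp hp).1
  have hmain := pv_incr nums1.length ((q : Int)) _ hps hn cnt hc
  refine ⟨hmain.1, ?_⟩
  intro i hi
  rw [hmain.2 i hi]
  congr 1
  have hcount :
      ((PySem.List.pyRange 0 (nums1.length : Int) 1).filter
        (fun j => PySem.List.pyGetD nums1 j 0 == v)).countP
          (fun p => PySem.Int.mod (p - (q : Int)) (nums1.length : Int) == (i : Int))
      = if nums1.getD ((i + q) % nums1.length) 0 == v then 1 else 0 := by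
    rw [List.countP_filter, PySem.List.pyRange_zero_natCast, List.countP_map]
    have hcongr : (List.range nums1.length).countP
        ((fun p => PySem.Int.mod (p - (q : Int)) (nums1.length : Int) == (i : Int)
            && (PySem.List.pyGetD nums1 p 0 == v)) ∘ (fun k : Nat => (k : Int)))
        = (List.range nums1.length).countP
          (fun k => decide (k = (i + q) % nums1.length) && (nums1.getD k 0 == v)) := by
      apply List.countP_congr
      intro k hk
      rw [List.mem_range] at hk
      simp only [Function.comp_apply, Bool.and_eq_true, beq_iff_eq, decide_eq_true_eq,
        PySem.List.pyGetD_natCast]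
      rw [pv_mod_iff nums1.length i q k hn hi hk]
    rw [hcongr, pv_count_range nums1.length _ _ (Nat.mod_lt _ hn)]
  rw [hcount]
  split <;> simp

theorem pv_cntloop (nums1 : List Int) (hn : 0 < nums1.length) (l2 : List Int) :
    ∀ (s : Nat) (cnt : List Int), cnt.length = nums1.length →
    (((PySem.List.enumerate l2 (s : Int)).foldl
        (fun c qv => pvTally (pvBuildPos nums1) nums1.length qv c) cnt).length = nums1.length
     ∧ ∀ i : Nat, i < nums1.length →
        ((PySem.List.enumerate l2 (s : Int)).foldl
          (fun c qv => pvTally (pvBuildPos nums1) nums1.length qv c) cnt).getD i 0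
          = cnt.getD i 0 + ((List.range l2.length).countP
              (fun k => nums1.getD ((i + (s + k)) % nums1.length) 0 == l2.getD k 0) : Int)) := by
  induction l2 with
  | nil =>
    intro s cnt hc
    simp [PySem.List.enumerate, hc]
  | cons x t ih =>
    intro s cnt hc
    rw [pv_enum_cons, List.foldl_cons]
    have hstep := pv_tally nums1 s x cnt hn hc
    have hcast : ((s : Int) + 1) = (((s + 1 : Nat) : Nat) : Int) := by push_cast; ring
    rw [hcast]
    have ihc := ih (s + 1) (pvTally (pvBuildPos nums1) nums1.length ((s : Int), x) cnt) hstep.1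
    refine ⟨ihc.1, ?_⟩
    intro i hi
    rw [ihc.2 i hi, hstep.2 i hi]
    have hrange : ((List.range (x :: t).length).countP
        (fun k => nums1.getD ((i + (s + k)) % nums1.length) 0 == (x :: t).getD k 0) : Nat)
        = (if nums1.getD ((i + s) % nums1.length) 0 == x then 1 else 0)
          + (List.range t.length).countP
              (fun k => nums1.getD ((i + (s + 1 + k)) % nums1.length) 0 == t.getD k 0) := by
      rw [List.length_cons, List.range_succ_eq_map, List.countP_cons, List.countP_map]
      have : (List.range t.length).countP
          ((fun k => nums1.getD ((i + (s + k)) % nums1.length) 0 == (x :: t).getD k 0) ∘ Nat.succ)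
          = (List.range t.length).countP
            (fun k => nums1.getD ((i + (s + 1 + k)) % nums1.length) 0 == t.getD k 0) := by
        apply List.countP_congr
        intro k hk
        simp only [Function.comp_apply, List.getD_cons_succ]
        rw [show i + (s + Nat.succ k) = i + (s + 1 + k) by omega]
      rw [this]
      simp [Nat.add_comm]
    rw [hrange]
    push_cast
    ring

theorem pv_main (nums1 nums2 : List Int) :
    maximumMatchingIndices nums1 nums2 = maximumMatchingIndices_alt nums1 nums2 := by
  by_cases hn : nums1.length = 0
  · rw [pv_A_eq, hn]
    simp [maximumMatchingIndices_alt, hn]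
  · have hpos : 0 < nums1.length := Nat.pos_of_ne_zero hn
    unfold maximumMatchingIndices_alt
    simp only [if_neg hn]
    rw [PySem.List.slice_to_natCast]
    set cnt : List Int := (PySem.List.enumerate (nums2.take nums1.length) 0).foldl
      (fun c qv => pvTally (pvBuildPos nums1) nums1.length qv c)
      (List.replicate nums1.length 0) with hcnt
    have h := pv_cntloop nums1 hpos (nums2.take nums1.length) 0
      (List.replicate nums1.length 0) (by simp)
    simp only [Nat.cast_zero, zero_add] at h
    rw [← hcnt] at h
    have hlen' : cnt.length = nums1.length := h.1
    have hval : ∀ i : Nat, i < nums1.length → cnt.getD i 0 = pvC nums1 nums2 i := by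
      intro i hi
      rw [h.2 i hi, List.getD_replicate 0 hi, zero_add]
      unfold pvC
      have : (List.range (nums2.take nums1.length).length).countP
          (fun k => nums1.getD ((i + k) % nums1.length) 0 == (nums2.take nums1.length).getD k 0)
          = (List.range (min nums1.length nums2.length)).countP
          (fun k => nums1.getD ((i + k) % nums1.length) 0 == nums2.getD k 0) := by
        rw [List.length_take]
        apply List.countP_congr
        intro k hk
        rw [List.mem_range] at hk
        have htk : (List.take nums1.length nums2).getD k 0 = nums2.getD k 0 := by
          rw [List.getD_eq_getElem?_getD, List.getD_eq_getElem?_getD, List.getElem?_take,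
            if_pos (by omega)]
        rw [htk]
      rw [this]
    have hmap : cnt = (List.range nums1.length).map (pvC nums1 nums2) := by
      apply List.ext_getElem (by simp [hlen'])
      intro i h1 h2
      rw [← List.getD_eq_getElem cnt 0 h1]
      rw [hval i (by omega)]
      simp
    obtain ⟨x, t, hxt⟩ : ∃ x t, cnt = x :: t := by
      cases hcc : cnt with
      | nil => rw [hcc] at hlen'; simp at hlen'; omega
      | cons x t => exact ⟨x, t, rfl⟩
    rw [hxt, PySem.List.max?_id_cons]
    have h0x : 0 ≤ x := by
      have := hval 0 hpos
      rw [hxt] at this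
      simp only [List.getD_cons_zero] at this
      rw [this]
      unfold pvC
      positivity
    rw [pv_A_eq]
    have : (List.range nums1.length).foldl (fun a i => max a (pvC nums1 nums2 i)) 0
        = List.foldl max 0 ((List.range nums1.length).map (pvC nums1 nums2)) := by
      rw [List.foldl_map]
    rw [this, ← hmap, hxt, List.foldl_cons, max_eq_right h0x]

-- ===== VERDICT (by name: the statement is the Claim_ definition above) =====
theorem maximumMatchingIndices_spec : Claim_equal_maximumMatchingIndices := by
  intro nums1 nums2 _
  unfold Spec_maximumMatchingIndices
  exact pv_main nums1 nums2
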